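-- pv_equiv track=rewrite | github.com/hoho-wenda0228/nlp_playground | NER/train.py | generate_entity_embedding
-- ===== SOURCE A (Python) =====
-- from typing import Dict, Iterable, List, Tuple
--
-- def generate_entity_embedding(sentence_label) -> List[Tuple[int, int]]:
--     # generate region label
--     label_region = []
--     for start_idx, head in enumerate(sentence_label):
--         if head == "S" or head == "B":
--             # single entity
--             if head == "S":
--                 label_region.append((start_idx, start_idx))
--
--             # other entity
--             for end_idx, tail in enumerate(sentence_label[start_idx + 1:]):
--                 if tail == "S" or tail == "E":
--                     tail_idx = start_idx + 1 + end_idx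
--                     label_region.append((start_idx, tail_idx))
--
--                 elif tail == "O":
--                     break
--     return label_region
-- ===== SOURCE B (Python) =====
-- def generate_entity_embedding(sentence_label):
--     # One right-to-left pass builds shared cons-cell lists: suffix[i] holds the
--     # indices j >= i labeled "S"/"E" that come before the first "O" at or after i.
--     # A single left-to-right pass then emits the pairs for each "S"/"B" start.
--     suffix = [None]
--     for i in range(len(sentence_label) - 1, -1, -1):
--         lab = sentence_label[i]
--         if lab == "O":
--             suffix.append(None)
--         elif lab == "S" or lab == "E":
--             suffix.append((i, suffix[-1]))
--         else:
--             suffix.append(suffix[-1])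
--     suffix.reverse()
--     res = []
--     for i, lab in enumerate(sentence_label):
--         if lab == "S" or lab == "B":
--             if lab == "S":
--                 res.append((i, i))
--             cell = suffix[i + 1]
--             while cell is not None:
--                 res.append((i, cell[0]))
--                 cell = cell[1]
--     return res
-- ===== Notes on version B (the rewrite author's own statement) =====
-- stated objective: alternative
-- what changed: Replaces A's per-start forward rescan of the remaining labels by one right-to-left pass that builds shared cons-cell suffix lists of S/E indices before the next O, then a single left-to-right pass that emits each start's pairs from its precomputed list.
import Mathlib
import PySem

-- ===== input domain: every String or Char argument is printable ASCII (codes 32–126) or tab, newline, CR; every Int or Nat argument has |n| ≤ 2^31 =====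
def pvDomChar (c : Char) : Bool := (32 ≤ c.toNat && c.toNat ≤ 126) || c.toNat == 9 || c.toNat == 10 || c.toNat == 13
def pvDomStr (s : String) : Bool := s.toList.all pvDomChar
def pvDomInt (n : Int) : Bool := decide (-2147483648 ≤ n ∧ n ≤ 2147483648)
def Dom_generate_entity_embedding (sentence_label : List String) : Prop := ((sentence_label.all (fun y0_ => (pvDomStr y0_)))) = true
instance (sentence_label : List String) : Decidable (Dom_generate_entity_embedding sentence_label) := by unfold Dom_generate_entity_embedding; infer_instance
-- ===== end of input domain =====

-- B replaces A's per-start rescans by one shared right-to-left suffix pass plus one emitting pass (alternative algorithm); return values proved equal.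
-- ===== PORT A =====
-- inner loop: enumerate(sentence_label[start_idx+1:]) with break on "O"
def pvAInner (si : Nat) : Nat → List String → List (Int × Int)
  | _, [] => []
  | k, t :: rest =>
    if t = "S" ∨ t = "E" then ((si : Int), ((si + 1 + k : Nat) : Int)) :: pvAInner si (k + 1) rest
    else if t = "O" then []
    else pvAInner si (k + 1) rest

-- outer loop: enumerate(sentence_label); note sentence_label[start_idx+1:] is exactly the rest of the suffix
def pvAGo : Nat → List String → List (Int × Int)
  | _, [] => []
  | i, h :: rest =>
    (if h = "S" ∨ h = "B" then
      (if h = "S" then [((i : Int), (i : Int))] else []) ++ pvAInner i 0 rest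
     else []) ++ pvAGo (i + 1) rest

def generate_entity_embedding (sentence_label : List String) : List (Int × Int) :=
  pvAGo 0 sentence_label

-- ===== PORT B =====
-- right-to-left pass: head of (pvBSuffix i l) is the list of indices j ≥ i with label "S"/"E"
-- before the first "O" at or after i (the Python cons cells are Lean lists, tails shared)
def pvBSuffix : Nat → List String → List (List Nat)
  | _, [] => [[]]
  | i, lab :: rest =>
    let s := pvBSuffix (i + 1) rest
    (if lab = "O" then [] else if lab = "S" ∨ lab = "E" then i :: s.headD [] else s.headD []) :: s

-- left-to-right emission; suf walks in lockstep with the labels (suffix[i+1] = (suf.drop 1).headD [])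
def pvBEmit : Nat → List String → List (List Nat) → List (Int × Int)
  | _, [], _ => []
  | i, lab :: rest, suf =>
    (if lab = "S" ∨ lab = "B" then
      (if lab = "S" then [((i : Int), (i : Int))] else []) ++
        ((suf.drop 1).headD []).map (fun j => ((i : Int), (j : Int)))
     else []) ++ pvBEmit (i + 1) rest (suf.drop 1)

def generate_entity_embedding_alt (sentence_label : List String) : List (Int × Int) :=
  pvBEmit 0 sentence_label (pvBSuffix 0 sentence_label)

-- ===== PRECONDITION & SPEC =====
def Spec_generate_entity_embedding (sentence_label : List String) (out : List (Int × Int)) : Prop := out = generate_entity_embedding_alt sentence_label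
instance (sentence_label : List String) (out : List (Int × Int)) : Decidable (Spec_generate_entity_embedding sentence_label out) := by unfold Spec_generate_entity_embedding; infer_instance

-- ===== CLAIM (what is proved, stated in full; the proofs are below) =====
def Claim_equal_generate_entity_embedding : Prop := ∀ (sentence_label : List String), Dom_generate_entity_embedding sentence_label → Spec_generate_entity_embedding sentence_label (generate_entity_embedding sentence_label)

-- ===== LEMMAS AND PROOFS =====
lemma pvInner_eq (si : Nat) : ∀ (l : List String) (k : Nat),
    pvAInner si k l = ((pvBSuffix (si + 1 + k) l).headD []).map (fun j => ((si : Int), (j : Int))) := by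
  intro l
  induction l with
  | nil => intro k; simp [pvAInner, pvBSuffix]
  | cons t rest ih =>
    intro k
    simp only [pvAInner, pvBSuffix]
    by_cases hse : t = "S" ∨ t = "E"
    · have hO : ¬ t = "O" := by rcases hse with h | h <;> simp [h]
      simp [hse, hO, ih (k + 1), Nat.add_assoc]
    · by_cases hO : t = "O"
      · simp [hO]
      · simp [hse, hO, ih (k + 1), Nat.add_assoc]

lemma pvGo_eq : ∀ (l : List String) (i : Nat), pvAGo i l = pvBEmit i l (pvBSuffix i l) := by
  intro l
  induction l with
  | nil => intro i; simp [pvAGo, pvBEmit]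
  | cons h rest ih =>
    intro i
    simp only [pvAGo, pvBEmit, pvBSuffix, List.drop_succ_cons, List.drop_zero]
    rw [ih (i + 1), pvInner_eq i rest 0]

-- ===== VERDICT (by name: the statement is the Claim_ definition above) =====
theorem generate_entity_embedding_spec : Claim_equal_generate_entity_embedding := by
  intro l _
  unfold Spec_generate_entity_embedding generate_entity_embedding generate_entity_embedding_alt
  exact pvGo_eq l 0
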